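-- pv_equiv track=rewrite | github.com/teofanaenachioiu/University-Courses | AI/Laborator/SudokuRapid/utils.py | fragmList
-- ===== SOURCE A (Python) =====
-- def fragmList(list_of_list, dimLista, dimCadran):
--     second = []
--     for lista in list_of_list:
--         aux = []
--         for j in range(int(dimLista / dimCadran)):
--             for mul in range(dimCadran):
--                 aux.append(lista[j + mul * dimLista // dimCadran])
--             if j % dimCadran == dimCadran - 1:
--                 second.append(aux)
--                 aux = []
--     return second
-- ===== SOURCE B (Python) =====
-- def fragmList(list_of_list, dimLista, dimCadran):
--     second = []
--     for lista in list_of_list: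
--         nblocks = int(dimLista / dimCadran) // dimCadran
--         if nblocks <= 0:
--             continue
--         offs = [mul * dimLista // dimCadran for mul in range(dimCadran)]
--         for g in range(nblocks):
--             base = g * dimCadran
--             cols = [lista[base + o: base + o + dimCadran] for o in offs]
--             second.append([x for tup in zip(*cols) for x in tup])
--     return second
-- ===== Notes on version B (the rewrite author's own statement) =====
-- stated objective: alternative
-- what changed: Replaces A's per-element index arithmetic with a stateful aux buffer flushed on j % dimCadran == dimCadran-1 by a slice-and-transpose scheme: per block it takes dimCadran contiguous slices at precomputed offsets and flattens their zip(*...) transpose, with no accumulator or flush condition.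
-- outside the precondition, e.g. on fragmList([[1, 2, 3]], 9, -3): A returns [], B returns [[]]; on fragmList([[1, 2]], 1, 0): A raises ZeroDivisionError, B raises ZeroDivisionError; on fragmList([[1, 2]], 9, 3): A raises IndexError, B returns [[]]
import Mathlib
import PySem

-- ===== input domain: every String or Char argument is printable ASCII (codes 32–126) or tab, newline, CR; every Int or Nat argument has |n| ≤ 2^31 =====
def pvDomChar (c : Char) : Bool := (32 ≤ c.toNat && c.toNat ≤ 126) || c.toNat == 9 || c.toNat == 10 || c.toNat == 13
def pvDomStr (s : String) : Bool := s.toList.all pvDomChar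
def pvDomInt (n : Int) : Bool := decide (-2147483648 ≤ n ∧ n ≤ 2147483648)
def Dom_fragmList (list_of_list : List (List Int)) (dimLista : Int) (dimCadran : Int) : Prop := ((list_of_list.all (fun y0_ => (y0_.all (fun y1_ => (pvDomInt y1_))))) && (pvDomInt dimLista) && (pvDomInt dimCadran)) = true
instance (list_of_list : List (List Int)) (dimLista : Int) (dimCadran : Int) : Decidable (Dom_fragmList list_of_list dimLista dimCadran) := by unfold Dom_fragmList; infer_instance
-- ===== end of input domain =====

-- B replaces A's per-element index arithmetic with a stateful aux buffer (flushed on a modular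
-- condition) by a slice-and-transpose scheme: each block is the flattened zip-transpose of
-- dimCadran contiguous slices taken at precomputed offsets; same return value, no mutation.

-- ===== PORT A =====
-- int(dimLista / dimCadran) is PySem.Int.truncdiv: exact for |arguments| < 2^53, which Dom guarantees.
def fragmList (list_of_list : List (List Int)) (dimLista : Int) (dimCadran : Int) : List (List Int) :=
  list_of_list.foldl (fun second lista =>
    ((PySem.List.pyRange 0 (PySem.Int.truncdiv dimLista dimCadran) 1).foldl
      (fun (st : List (List Int) × List Int) j =>
        let aux := (PySem.List.pyRange 0 dimCadran 1).foldl
          (fun aux mul => aux ++ [PySem.List.pyGetD lista (j + PySem.Int.floordiv (mul * dimLista) dimCadran) 0]) st.2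
        if PySem.Int.mod j dimCadran = dimCadran - 1 then (st.1 ++ [aux], ([] : List Int)) else (st.1, aux))
      (second, [])).1) []

-- ===== PORT B =====
-- zip(*cols) is a standard-library call: ported by its contract (transpose truncated at the
-- shortest column; zip() of no columns is empty).
def pvZipStar (cols : List (List Int)) : List (List Int) :=
  match (cols.map List.length).min? with
  | none => []
  | some n => (List.range n).map (fun r => cols.map (fun col => col.getD r 0))

def fragmList_alt (list_of_list : List (List Int)) (dimLista : Int) (dimCadran : Int) : List (List Int) :=
  list_of_list.foldl (fun second lista =>
    let nblocks := PySem.Int.floordiv (PySem.Int.truncdiv dimLista dimCadran) dimCadran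
    if nblocks ≤ 0 then second
    else
      let offs := (PySem.List.pyRange 0 dimCadran 1).map (fun mul => PySem.Int.floordiv (mul * dimLista) dimCadran)
      (PySem.List.pyRange 0 nblocks 1).foldl
        (fun second g =>
          let base := g * dimCadran
          let cols := offs.map (fun o => PySem.List.slice lista (some (base + o)) (some (base + o + dimCadran)))
          second ++ [(pvZipStar cols).flatMap (fun tup => tup)])
        second) []

-- ===== PRECONDITION & SPEC =====
-- Pre_ excludes dimCadran = 0 with a nonempty list (A raises ZeroDivisionError), rows too short
-- for the accessed indices (A raises IndexError), and the degenerate corner of negative dimCadran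
-- with int(dimLista/dimCadran) // dimCadran >= 1, where A's empty inner range(dimCadran) and
-- never-firing flush make it return [] regardless of the data — an accident of the
-- implementation that B (which emits that many empty blocks there) should not copy.
def Pre_fragmList (list_of_list : List (List Int)) (dimLista : Int) (dimCadran : Int) : Prop :=
  list_of_list = []
  ∨ (0 < dimCadran ∧ ∀ l ∈ list_of_list,
      PySem.Int.truncdiv dimLista dimCadran ≤ 0 ∨
      PySem.Int.truncdiv dimLista dimCadran - 1
        + PySem.Int.floordiv ((dimCadran - 1) * dimLista) dimCadran < (l.length : Int))
  ∨ (dimCadran ≤ -1 ∧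
      PySem.Int.floordiv (PySem.Int.truncdiv dimLista dimCadran) dimCadran ≤ 0)
instance (list_of_list : List (List Int)) (dimLista : Int) (dimCadran : Int) : Decidable (Pre_fragmList list_of_list dimLista dimCadran) := by unfold Pre_fragmList; infer_instance

def pvWitness_fragmList : List (List Int) × Int × Int := ([[1, 2, 3, 4], [5, 6, 7, 8]], 4, 2)

def Spec_fragmList (list_of_list : List (List Int)) (dimLista : Int) (dimCadran : Int) (out : List (List Int)) : Prop := out = fragmList_alt list_of_list dimLista dimCadran
instance (list_of_list : List (List Int)) (dimLista : Int) (dimCadran : Int) (out : List (List Int)) : Decidable (Spec_fragmList list_of_list dimLista dimCadran out) := by unfold Spec_fragmList; infer_instance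

-- ===== CLAIM (what is proved, stated in full; the proofs are below) =====
def Claim_equal_fragmList : Prop := ∀ (list_of_list : List (List Int)) (dimLista : Int) (dimCadran : Int), Dom_fragmList list_of_list dimLista dimCadran → Pre_fragmList list_of_list dimLista dimCadran → Spec_fragmList list_of_list dimLista dimCadran (fragmList list_of_list dimLista dimCadran)

-- ===== LEMMAS AND PROOFS =====

-- proof-side views of the two ports
def pvRow (lista : List Int) (m c j : Int) : List Int :=
  (PySem.List.pyRange 0 c 1).map (fun mul => PySem.List.pyGetD lista (j + PySem.Int.floordiv (mul * m) c) 0)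

def pvStep (lista : List Int) (m c : Int) (st : List (List Int) × List Int) (j : Int) :
    List (List Int) × List Int :=
  if PySem.Int.mod j c = c - 1 then (st.1 ++ [st.2 ++ pvRow lista m c j], ([] : List Int))
  else (st.1, st.2 ++ pvRow lista m c j)

-- the common normal form: the list of blocks, indexed arithmetically
def pvBlockIdx (lista : List Int) (m c g : Int) : List Int :=
  (PySem.List.pyRange 0 c 1).flatMap (fun r =>
    (PySem.List.pyRange 0 c 1).map (fun mul =>
      PySem.List.pyGetD lista (g * c + r + PySem.Int.floordiv (mul * m) c) 0))

def pvBlocks (lista : List Int) (m c : Int) : List (List Int) :=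
  (PySem.List.pyRange 0
    (PySem.Int.floordiv (PySem.Int.truncdiv m c) c) 1).map (pvBlockIdx lista m c)

def pvCols (lista : List Int) (m c g : Int) : List (List Int) :=
  ((PySem.List.pyRange 0 c 1).map (fun mul => PySem.Int.floordiv (mul * m) c)).map
    (fun o => PySem.List.slice lista (some (g * c + o)) (some (g * c + o + c)))

lemma pv_fragmList_eq (L : List (List Int)) (m c : Int) :
    fragmList L m c = L.foldl (fun second lista =>
      ((PySem.List.pyRange 0 (PySem.Int.truncdiv m c) 1).foldl (pvStep lista m c)
        (second, ([] : List Int))).1) [] := by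
  unfold fragmList pvStep pvRow
  simp only [PySem.List.foldl_append_singleton_eq_map]

lemma pv_alt_eq (L : List (List Int)) (m c : Int) :
    fragmList_alt L m c = L.foldl (fun second lista =>
      second ++ (PySem.List.pyRange 0
        (PySem.Int.floordiv (PySem.Int.truncdiv m c) c) 1).map (fun g =>
          (pvZipStar (pvCols lista m c g)).flatMap (fun tup => tup))) [] := by
  unfold fragmList_alt pvCols
  apply PySem.List.foldl_congr_mem
  intro acc x _
  by_cases h : PySem.Int.floordiv (PySem.Int.truncdiv m c) c ≤ 0
  · rw [if_pos h, PySem.List.pyRange_one_eq_nil h]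
    simp
  · rw [if_neg h]
    simp only [PySem.List.foldl_append_singleton_eq_map]

lemma pv_noflush (lista : List Int) (m c : Int) :
    ∀ (ran : List Int), (∀ j ∈ ran, PySem.Int.mod j c ≠ c - 1) →
      ∀ (sec : List (List Int)) (aux : List Int),
      List.foldl (pvStep lista m c) (sec, aux) ran = (sec, aux ++ ran.flatMap (pvRow lista m c)) := by
  intro ran
  induction ran with
  | nil => intro _ sec aux; simp
  | cons j t ih =>
      intro h sec aux
      rw [List.foldl_cons]
      have hj : PySem.Int.mod j c ≠ c - 1 := h j (List.mem_cons_self)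
      simp only [pvStep, if_neg hj]
      rw [ih (fun x hx => h x (List.mem_cons_of_mem _ hx)) sec (aux ++ pvRow lista m c j)]
      simp [List.append_assoc]

lemma pv_mod_window {c g j : Int} (hc : 0 < c) (h1 : g * c ≤ j) (h2 : j < g * c + c) :
    PySem.Int.mod j c = j - g * c := by
  calc PySem.Int.mod j c = ((j - g * c) + c * g) % c := by
        rw [PySem.Int.mod_eq_emod_of_pos hc]; congr 1; ring
    _ = (j - g * c) % c := by rw [Int.add_mul_emod_self_left]
    _ = j - g * c := Int.emod_eq_of_lt (by omega) (by omega)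

lemma pv_chunk (lista : List Int) (m c : Int) (hc : 0 < c) (g : Int) (sec : List (List Int)) :
    List.foldl (pvStep lista m c) (sec, ([] : List Int)) (PySem.List.pyRange (g * c) (g * c + c) 1) =
    (sec ++ [(PySem.List.pyRange (g * c) (g * c + c) 1).flatMap (pvRow lista m c)], ([] : List Int)) := by
  have hsplit : PySem.List.pyRange (g * c) (g * c + c) 1 =
      PySem.List.pyRange (g * c) (g * c + (c - 1)) 1 ++ [g * c + (c - 1)] := by
    rw [PySem.List.pyRange_one_append (g * c) (g * c + (c - 1)) (g * c + c) (by omega) (by omega)]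
    congr 1
    have h : g * c + c = (g * c + (c - 1)) + 1 := by ring
    rw [h, PySem.List.pyRange_one_singleton]
  have hno : ∀ j ∈ PySem.List.pyRange (g * c) (g * c + (c - 1)) 1, PySem.Int.mod j c ≠ c - 1 := by
    intro j hj
    rw [PySem.List.mem_pyRange_one] at hj
    rw [pv_mod_window (g := g) hc (by omega) (by omega)]
    omega
  rw [hsplit, List.foldl_append, pv_noflush lista m c _ hno sec []]
  have hm : PySem.Int.mod (g * c + (c - 1)) c = c - 1 := by
    rw [pv_mod_window (g := g) hc (by omega) (by omega)]; ring
  simp [pvStep, hm, List.flatMap_append]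

lemma pv_blocks_loop (lista : List Int) (m c : Int) (hc : 0 < c) :
    ∀ (n : Nat) (sec : List (List Int)),
      List.foldl (pvStep lista m c) (sec, ([] : List Int)) (PySem.List.pyRange 0 ((n : Int) * c) 1) =
      (sec ++ (List.range n).map (fun (g : Nat) =>
        (PySem.List.pyRange ((g : Int) * c) ((g : Int) * c + c) 1).flatMap (pvRow lista m c)),
       ([] : List Int)) := by
  intro n
  induction n with
  | zero => intro sec; simp
  | succ n ih =>
      intro sec
      have hnc : (0 : Int) ≤ (n : Int) * c := by positivity
      have hsplit : PySem.List.pyRange 0 (((n + 1 : Nat) : Int) * c) 1 =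
          PySem.List.pyRange 0 ((n : Int) * c) 1 ++
          PySem.List.pyRange ((n : Int) * c) ((n : Int) * c + c) 1 := by
        have h1 : (((n + 1 : Nat) : Int)) * c = (n : Int) * c + c := by push_cast; ring
        rw [h1, PySem.List.pyRange_one_append 0 ((n : Int) * c) ((n : Int) * c + c) hnc (by omega)]
      rw [hsplit, List.foldl_append, ih, pv_chunk lista m c hc (n : Int)]
      rw [List.range_succ, List.map_append, List.map_singleton, List.append_assoc]

lemma pv_fdiv_nonneg {m c : Int} (hm : 0 ≤ m) (hc : 0 < c) : 0 ≤ PySem.Int.floordiv m c := by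
  rw [PySem.Int.floordiv_eq_ediv_of_pos hc]
  exact Int.ediv_nonneg hm hc.le

lemma pv_fdiv_neg {m c : Int} (hm : m < 0) (hc : 0 < c) : PySem.Int.floordiv m c < 0 := by
  have := (PySem.Int.floordiv_lt_iff_lt_mul (a := m) (q := 0) hc)
  omega

lemma pv_fdiv_nonpos {m c : Int} (hm : m ≤ 0) (hc : 0 < c) : PySem.Int.floordiv m c ≤ 0 := by
  rcases lt_or_eq_of_le hm with h | h
  · exact (pv_fdiv_neg h hc).le
  · rw [h]
    show Int.fdiv 0 c ≤ 0
    simp [Int.zero_fdiv]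

lemma pv_tdiv_nonpos {m c : Int} (hm : m < 0) (hc : 0 < c) : PySem.Int.truncdiv m c ≤ 0 := by
  have h := Int.tdiv_nonneg (a := -m) (b := c) (by omega) (by omega)
  rw [Int.neg_tdiv] at h
  show m.tdiv c ≤ 0
  omega

lemma pv_fdiv_mono {a b c : Int} (hc : 0 < c) (h : a ≤ b) :
    PySem.Int.floordiv a c ≤ PySem.Int.floordiv b c := by
  rw [PySem.Int.floordiv_eq_ediv_of_pos hc, PySem.Int.floordiv_eq_ediv_of_pos hc]
  exact Int.ediv_le_ediv hc h

lemma pv_min?_const (k : Nat) (l : List Nat) (h : ∀ x ∈ l, x = k) (hne : l ≠ []) :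
    l.min? = some k := by
  rw [List.min?_eq_some_iff]
  rcases List.exists_mem_of_ne_nil l hne with ⟨a, ha⟩
  exact ⟨(h a ha) ▸ ha, fun b hb => by rw [h b hb]⟩

-- one full slice, elementwise
lemma pv_slice_getD (lista : List Int) (c a : Int) (r : Nat) (ha : 0 ≤ a)
    (_hlen : a + c ≤ (lista.length : Int)) (hr : (r : Int) < c) :
    (PySem.List.slice lista (some a) (some (a + c))).getD r 0 =
      PySem.List.pyGetD lista (a + (r : Int)) 0 := by
  rw [PySem.List.slice_toNat lista ha (by omega)]
  have h1 : (a + c).toNat - a.toNat = c.toNat := by omega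
  rw [h1]
  have hidx : a + (r : Int) = ((a.toNat + r : Nat) : Int) := by omega
  rw [hidx, PySem.List.pyGetD_natCast]
  have hrc : r < c.toNat := by omega
  simp only [List.getD_eq_getElem?_getD, List.getElem?_take, List.getElem?_drop]
  rw [if_pos hrc]

lemma pv_slice_len (lista : List Int) (c a : Int) (ha : 0 ≤ a) (hc : 0 ≤ c)
    (hlen : a + c ≤ (lista.length : Int)) :
    (PySem.List.slice lista (some a) (some (a + c))).length = c.toNat := by
  rw [PySem.List.slice_toNat lista ha (by omega)]
  have h1 : (a + c).toNat - a.toNat = c.toNat := by omega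
  rw [h1]
  simp only [List.length_take, List.length_drop]
  omega

-- B's block (slices + zip transpose, flattened) equals the arithmetically indexed block
lemma pv_alt_block (lista : List Int) (m c g : Int) (hc : 0 < c) (hm : 0 ≤ m) (hg : 0 ≤ g)
    (hbound : g * c + c - 1 + PySem.Int.floordiv ((c - 1) * m) c < (lista.length : Int)) :
    (pvZipStar (pvCols lista m c g)).flatMap (fun tup => tup) = pvBlockIdx lista m c g := by
  have hOff : ∀ (mu : Int), 0 ≤ mu → mu < c →
      0 ≤ PySem.Int.floordiv (mu * m) c ∧
      PySem.Int.floordiv (mu * m) c ≤ PySem.Int.floordiv ((c - 1) * m) c := by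
    intro mu h0 h1
    exact ⟨pv_fdiv_nonneg (by nlinarith) hc, pv_fdiv_mono hc (by nlinarith)⟩
  have hPR : PySem.List.pyRange 0 c 1 = (List.range c.toNat).map (fun k : Nat => (k : Int)) := by
    rw [PySem.List.pyRange_one 0 c]
    have h0 : (c - 0).toNat = c.toNat := by omega
    rw [h0]
    exact List.map_congr_left (fun k _ => by omega)
  have hFull : ∀ col ∈ pvCols lista m c g, col.length = c.toNat := by
    intro col hcol
    unfold pvCols at hcol
    rw [List.map_map] at hcol
    rcases List.mem_map.1 hcol with ⟨mul, hmul, rfl⟩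
    rw [PySem.List.mem_pyRange_one] at hmul
    rcases hOff mul hmul.1 hmul.2 with ⟨ho0, hoB⟩
    exact pv_slice_len lista c (g * c + PySem.Int.floordiv (mul * m) c)
      (by nlinarith) hc.le (by omega)
  have hne : pvCols lista m c g ≠ [] := by
    unfold pvCols
    simp only [ne_eq, List.map_eq_nil_iff]
    intro h
    have h2 := congrArg List.length h
    rw [PySem.List.length_pyRange_one] at h2
    simp at h2
    omega
  have hmin : ((pvCols lista m c g).map List.length).min? = some c.toNat := by
    apply pv_min?_const
    · intro x hx
      rcases List.mem_map.1 hx with ⟨col, hcol, rfl⟩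
      exact hFull col hcol
    · simpa using hne
  unfold pvZipStar
  rw [hmin]
  unfold pvBlockIdx
  rw [hPR, List.flatMap_map, List.flatMap_map]
  apply List.flatMap_congr
  intro r hr
  have hrlt : r < c.toNat := List.mem_range.1 hr
  unfold pvCols
  simp only [hPR, List.map_map]
  apply List.map_congr_left
  intro mul hmulr
  have hmul2 : mul < c.toNat := List.mem_range.1 hmulr
  rcases hOff (mul : Int) (by positivity) (by omega) with ⟨ho0, hoB⟩
  simp only [Function.comp]
  rw [pv_slice_getD lista c (g * c + PySem.Int.floordiv ((mul : Int) * m) c) r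
    (by nlinarith) (by omega) (by omega)]
  congr 1
  ring

-- a block, re-indexed as the concatenation of A's rows over its j-window
lemma pv_block_eq (lista : List Int) (m c g : Int) :
    pvBlockIdx lista m c g =
      (PySem.List.pyRange (g * c) (g * c + c) 1).flatMap (pvRow lista m c) := by
  unfold pvBlockIdx pvRow
  rw [PySem.List.pyRange_one (g * c) (g * c + c), PySem.List.pyRange_one 0 c]
  have hr : (g * c + c - g * c).toNat = (c - 0).toNat := by congr 1; ring
  rw [hr]
  simp only [List.flatMap_map, List.map_map]
  congr 1
  funext k
  apply List.map_congr_left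
  intro mul _
  try simp only [Function.comp]
  congr 1
  ring

-- per-lista: A's stateful loop produces exactly the blocks
lemma pv_perlista (lista : List Int) (m c : Int) (hc : 0 < c) (sec : List (List Int)) :
    (List.foldl (pvStep lista m c) (sec, ([] : List Int))
      (PySem.List.pyRange 0 (PySem.Int.truncdiv m c) 1)).1 = sec ++ pvBlocks lista m c := by
  rcases Int.lt_or_le m 0 with hm | hm
  · have h1 : PySem.Int.truncdiv m c ≤ 0 := pv_tdiv_nonpos hm hc
    have h3 : PySem.Int.floordiv (PySem.Int.truncdiv m c) c ≤ 0 := pv_fdiv_nonpos h1 hc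
    rw [PySem.List.pyRange_one_eq_nil h1]
    simp [pvBlocks, PySem.List.pyRange_one_eq_nil h3]
  · have htr : PySem.Int.truncdiv m c = PySem.Int.floordiv m c := by
      show m.tdiv c = m.fdiv c
      rw [Int.tdiv_eq_ediv_of_nonneg hm, Int.fdiv_eq_ediv_of_nonneg (a := m) hc.le]
    set q := PySem.Int.floordiv m c with hqdef
    have hq0 : 0 ≤ q := pv_fdiv_nonneg hm hc
    set d := PySem.Int.floordiv q c with hddef
    have hd0 : 0 ≤ d := pv_fdiv_nonneg hq0 hc
    have hbr : d * c ≤ q ∧ q < (d + 1) * c := (PySem.Int.floordiv_eq_iff_of_pos hc).1 hddef.symm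
    set n := d.toNat with hndef
    have hn : (n : Int) = d := Int.toNat_of_nonneg hd0
    have hnc : (0 : Int) ≤ (n : Int) * c := by positivity
    have hsplit : PySem.List.pyRange 0 q 1 =
        PySem.List.pyRange 0 ((n : Int) * c) 1 ++ PySem.List.pyRange ((n : Int) * c) q 1 :=
      PySem.List.pyRange_one_append 0 ((n : Int) * c) q hnc (by rw [hn]; exact hbr.1)
    have hq2 : q < (n : Int) * c + c := by rw [hn]; nlinarith [hbr.2]
    have hno : ∀ j ∈ PySem.List.pyRange ((n : Int) * c) q 1, PySem.Int.mod j c ≠ c - 1 := by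
      intro j hj
      rw [PySem.List.mem_pyRange_one] at hj
      rw [pv_mod_window (g := (n : Int)) hc (by omega) (by omega)]
      omega
    have hb : pvBlocks lista m c = (List.range n).map (fun (g : Nat) =>
        (PySem.List.pyRange ((g : Int) * c) ((g : Int) * c + c) 1).flatMap (pvRow lista m c)) := by
      unfold pvBlocks
      rw [htr, ← hddef, ← hn, PySem.List.pyRange_zero_natCast n, List.map_map]
      apply List.map_congr_left
      intro g _
      exact pv_block_eq lista m c (g : Int)
    rw [htr, hsplit, List.foldl_append, pv_blocks_loop lista m c hc n sec,
        pv_noflush lista m c _ hno _ _, hb]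

-- per-lista: B's slice-and-transpose loop produces the same blocks
lemma pv_perlista_alt (lista : List Int) (m c : Int) (hc : 0 < c)
    (hpre : PySem.Int.truncdiv m c ≤ 0 ∨
      PySem.Int.truncdiv m c - 1 + PySem.Int.floordiv ((c - 1) * m) c < (lista.length : Int)) :
    (PySem.List.pyRange 0 (PySem.Int.floordiv (PySem.Int.truncdiv m c) c) 1).map (fun g =>
      (pvZipStar (pvCols lista m c g)).flatMap (fun tup => tup)) = pvBlocks lista m c := by
  unfold pvBlocks
  apply List.map_congr_left
  intro g hg
  rw [PySem.List.mem_pyRange_one] at hg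
  set q := PySem.Int.truncdiv m c with hqdef
  set nb := PySem.Int.floordiv q c with hnbdef
  have hbr : nb * c ≤ q ∧ q < (nb + 1) * c := (PySem.Int.floordiv_eq_iff_of_pos hc).1 hnbdef.symm
  have hq1 : c ≤ q := by nlinarith [hg.1, hg.2, hbr.1]
  have hm : 0 ≤ m := by
    by_contra hneg
    have := pv_tdiv_nonpos (by omega : m < 0) hc
    omega
  have hbound : q - 1 + PySem.Int.floordiv ((c - 1) * m) c < (lista.length : Int) := by
    rcases hpre with h | h
    · omega
    · exact h
  apply pv_alt_block lista m c g hc hm hg.1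
  have hgc : g * c + c ≤ nb * c := by nlinarith [hg.2]
  omega

-- negative dimCadran with a non-positive block count: both sides return []
lemma pv_neg_case (L : List (List Int)) (m c : Int) (hcneg : c < 0)
    (hd : PySem.Int.floordiv (PySem.Int.truncdiv m c) c ≤ 0) :
    fragmList L m c = fragmList_alt L m c := by
  rw [pv_fragmList_eq, pv_alt_eq]
  have hno : ∀ (j : Int), PySem.Int.mod j c ≠ c - 1 := by
    intro j
    have := PySem.Int.mod_neg_bounds j hcneg
    omega
  have h1 : ∀ (acc : List (List Int)), ∀ x ∈ L,
      ((PySem.List.pyRange 0 (PySem.Int.truncdiv m c) 1).foldl (pvStep x m c)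
        (acc, ([] : List Int))).1 = acc := by
    intro acc x _
    rw [pv_noflush x m c _ (fun j _ => hno j) acc []]
  rw [PySem.List.foldl_congr_mem L _ (fun acc _ => acc) [] h1, PySem.List.foldl_ignore]
  have h2 : ∀ (acc : List (List Int)), ∀ x ∈ L,
      acc ++ (PySem.List.pyRange 0 (PySem.Int.floordiv (PySem.Int.truncdiv m c) c) 1).map
        (fun g => (pvZipStar (pvCols x m c g)).flatMap (fun tup => tup)) = acc := by
    intro acc x _
    rw [PySem.List.pyRange_one_eq_nil hd]
    simp
  rw [PySem.List.foldl_congr_mem L _ (fun acc _ => acc) [] h2, PySem.List.foldl_ignore]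

-- ===== VERDICT (by name: the statement is the Claim_ definition above) =====
theorem fragmList_spec : Claim_equal_fragmList := by
  intro L m c _ hpre
  show fragmList L m c = fragmList_alt L m c
  rcases hpre with hL | ⟨hc, hb⟩ | ⟨hc, hm⟩
  · rw [hL]; rfl
  · rw [pv_fragmList_eq, pv_alt_eq]
    rw [PySem.List.foldl_congr_mem L _ (fun sec lista => sec ++ pvBlocks lista m c) []
      (by intro acc x _; exact pv_perlista x m c hc acc)]
    rw [PySem.List.foldl_congr_mem L
      (fun second lista => second ++ (PySem.List.pyRange 0
        (PySem.Int.floordiv (PySem.Int.truncdiv m c) c) 1).map (fun g =>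
          (pvZipStar (pvCols lista m c g)).flatMap (fun tup => tup)))
      (fun sec lista => sec ++ pvBlocks lista m c) []
      (by intro acc x hx
          exact congrArg (fun t => acc ++ t) (pv_perlista_alt x m c hc (hb x hx)))]
  · exact pv_neg_case L m c (by omega) hm
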